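-- pv_equiv track=rewrite | github.com/inaciovasquez2020/cyclone-terminal-obstruction | scripts/ef/ef_game.py | partial_isomorphism
-- ===== SOURCE A (Python) =====
-- def adjacency(G, u, v):
--     return v in G.get(u, set())
--
-- def partial_isomorphism(G1, G2, xs, ys):
--     if len(set(xs)) != len(set(ys)):
--         return False
--     for i in range(len(xs)):
--         for j in range(len(xs)):
--             if adjacency(G1, xs[i], xs[j]) != adjacency(G2, ys[i], ys[j]):
--                 return False
--             if (xs[i] == xs[j]) != (ys[i] == ys[j]):
--                 return False
--     return True
-- ===== SOURCE B (Python) =====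
-- def partial_isomorphism(G1, G2, xs, ys):
--     if len(set(xs)) != len(set(ys)):
--         return False
--     pairs = list(dict.fromkeys(zip(xs, ys)))
--     k = len(pairs)
--     if len({p[0] for p in pairs}) != k or len({p[1] for p in pairs}) != k:
--         return False
--     for x, y in pairs:
--         image = {q[1] for q in pairs if q[0] in G1.get(x, set())}
--         nbrs = {q[1] for q in pairs if q[1] in G2.get(y, set())}
--         if image != nbrs:
--             return False
--     return True
-- ===== Notes on version B (the rewrite author's own statement) =====
-- stated objective: alternative
-- what changed: A's double loop over all index pairs is replaced by deduplicating the (x,y) pairs once, two cardinality checks that the pair map is functional and injective, and one neighbour-image set comparison per distinct pair, so the work depends on the number of distinct pairs rather than on len(xs)^2.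
-- outside the precondition, e.g. on partial_isomorphism({}, {}, [1, 1, 2], [3, 4]): A returns False, B returns False
import Mathlib
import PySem

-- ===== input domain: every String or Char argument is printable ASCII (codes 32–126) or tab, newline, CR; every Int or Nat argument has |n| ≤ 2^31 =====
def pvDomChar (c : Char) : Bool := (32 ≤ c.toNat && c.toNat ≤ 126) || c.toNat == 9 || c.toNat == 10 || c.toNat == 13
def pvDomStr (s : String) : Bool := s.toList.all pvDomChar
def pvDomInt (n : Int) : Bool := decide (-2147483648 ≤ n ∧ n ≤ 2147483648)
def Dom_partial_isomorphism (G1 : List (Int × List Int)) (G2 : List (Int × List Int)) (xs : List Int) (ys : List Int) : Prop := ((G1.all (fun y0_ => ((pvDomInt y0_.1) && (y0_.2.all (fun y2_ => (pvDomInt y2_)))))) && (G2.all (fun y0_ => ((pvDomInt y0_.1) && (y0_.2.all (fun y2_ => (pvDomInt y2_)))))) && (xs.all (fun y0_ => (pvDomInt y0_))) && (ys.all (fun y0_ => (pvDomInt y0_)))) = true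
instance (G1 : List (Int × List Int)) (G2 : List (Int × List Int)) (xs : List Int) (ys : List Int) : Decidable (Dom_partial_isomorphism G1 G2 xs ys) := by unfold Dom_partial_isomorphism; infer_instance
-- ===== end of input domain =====

-- B replaces A's index-pair double loop by a dedup of the (x,y) pairs, two cardinality
-- checks (the pair map is functional and injective) and one neighbour-image set
-- comparison per distinct pair (objective: alternative algorithm).

-- ===== PORT A =====
-- v in G.get(u, set())
def adjacency (G : List (Int × List Int)) (u : Int) (v : Int) : Bool :=
  ((PySem.Dict.mk G).getD u []).contains v

def partial_isomorphism (G1 : List (Int × List Int)) (G2 : List (Int × List Int)) (xs : List Int) (ys : List Int) : Bool :=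
  if (PySem.Set.ofList xs).len != (PySem.Set.ofList ys).len then false
  else
    -- nested 'for … in range(len(xs))' with 'return False' = all pairs pass
    -- (ys[i]/ys[j] raise IndexError when ys is shorter: excluded by Pre_; pyGetD's default is unreachable inside Pre_)
    (PySem.List.pyRange 0 (PySem.List.len xs) 1).all (fun i =>
      (PySem.List.pyRange 0 (PySem.List.len xs) 1).all (fun j =>
        (adjacency G1 (PySem.List.pyGetD xs i 0) (PySem.List.pyGetD xs j 0)
           == adjacency G2 (PySem.List.pyGetD ys i 0) (PySem.List.pyGetD ys j 0))
        && ((PySem.List.pyGetD xs i 0 == PySem.List.pyGetD xs j 0)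
           == (PySem.List.pyGetD ys i 0 == PySem.List.pyGetD ys j 0))))

-- ===== PORT B =====
def partial_isomorphism_alt (G1 : List (Int × List Int)) (G2 : List (Int × List Int)) (xs : List Int) (ys : List Int) : Bool :=
  if (PySem.Set.ofList xs).len != (PySem.Set.ofList ys).len then false
  else
    let pairs := PySem.List.dedup (xs.zip ys)       -- list(dict.fromkeys(zip(xs, ys)))
    let k := pairs.length
    if (PySem.Set.ofList (pairs.map (fun p => p.1))).length != k
       || (PySem.Set.ofList (pairs.map (fun p => p.2))).length != k then false
    else
      pairs.all (fun p =>
        PySem.Set.equal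
          (PySem.Set.ofList ((pairs.filter (fun q => ((PySem.Dict.mk G1).getD p.1 []).contains q.1)).map (fun q => q.2)))
          (PySem.Set.ofList ((pairs.filter (fun q => ((PySem.Dict.mk G2).getD p.2 []).contains q.2)).map (fun q => q.2))))

-- ===== PRECONDITION & SPEC =====
-- Pre_ excludes the inputs where ys is shorter than xs while the distinct-value counts agree:
-- there A hits 'ys[i]' / 'ys[j]' out of range and raises IndexError (on part of that region it
-- still returns False early, which B also returns — see the cites in claim.json).
def Pre_partial_isomorphism (G1 : List (Int × List Int)) (G2 : List (Int × List Int)) (xs : List Int) (ys : List Int) : Prop :=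
  (PySem.List.dedup xs).length ≠ (PySem.List.dedup ys).length ∨ xs.length ≤ ys.length
instance (G1 : List (Int × List Int)) (G2 : List (Int × List Int)) (xs : List Int) (ys : List Int) : Decidable (Pre_partial_isomorphism G1 G2 xs ys) := by unfold Pre_partial_isomorphism; infer_instance
def pvWitness_partial_isomorphism : (List (Int × List Int)) × (List (Int × List Int)) × List Int × List Int :=
  ([(1, [2])], [(3, [4])], [1], [3, 3])

def Spec_partial_isomorphism (G1 : List (Int × List Int)) (G2 : List (Int × List Int)) (xs : List Int) (ys : List Int) (out : Bool) : Prop := out = partial_isomorphism_alt G1 G2 xs ys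
instance (G1 : List (Int × List Int)) (G2 : List (Int × List Int)) (xs : List Int) (ys : List Int) (out : Bool) : Decidable (Spec_partial_isomorphism G1 G2 xs ys out) := by unfold Spec_partial_isomorphism; infer_instance

-- ===== CLAIM (what is proved, stated in full; the proofs are below) =====
def Claim_equal_partial_isomorphism : Prop := ∀ (G1 : List (Int × List Int)) (G2 : List (Int × List Int)) (xs : List Int) (ys : List Int), Dom_partial_isomorphism G1 G2 xs ys → Pre_partial_isomorphism G1 G2 xs ys → Spec_partial_isomorphism G1 G2 xs ys (partial_isomorphism G1 G2 xs ys)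

-- ===== LEMMAS AND PROOFS =====

-- neighbour list of x in G (both programs read it through G.get(x, set()))
def pvNbr (G : List (Int × List Int)) (x : Int) : List Int := (PySem.Dict.mk G).getD x []

-- the two quantifier forms both programs decide, over the pair list L = zip xs ys
def pvCons (L : List (Int × Int)) : Prop :=
  ∀ p ∈ L, ∀ q ∈ L, (p.1 = q.1 ↔ p.2 = q.2)
def pvAdj (G1 G2 : List (Int × List Int)) (L : List (Int × Int)) : Prop :=
  ∀ p ∈ L, ∀ q ∈ L, (q.1 ∈ pvNbr G1 p.1 ↔ q.2 ∈ pvNbr G2 p.2)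

-- dedup keeps the length only of a Nodup list
lemma pv_dedup_length_eq_iff {α : Type} [BEq α] [LawfulBEq α] (l : List α) :
    (PySem.List.dedup l).length = l.length ↔ l.Nodup := by
  induction l with
  | nil => simp
  | cons x xs ih =>
    have hd : PySem.List.dedup (x :: xs) = x :: (PySem.Set.ofList xs).discard x := by
      simp [PySem.Set.ofList_cons]
    rw [hd]
    simp only [List.length_cons, List.nodup_cons, Nat.add_right_cancel_iff]
    have hle1 : ((PySem.Set.ofList xs).discard x).length ≤ (PySem.Set.ofList xs).length :=
      List.length_filter_le _ _
    have hle2 := PySem.Set.length_ofList_le xs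
    constructor
    · intro h
      have h1 : (PySem.Set.ofList xs).length = xs.length := by omega
      have h2 : ((PySem.Set.ofList xs).discard x).length = (PySem.Set.ofList xs).length := by omega
      have hnd : xs.Nodup := by
        have := ih.mp (by simpa using h1)
        exact this
      refine ⟨?_, hnd⟩
      have := List.length_filter_eq_length_iff.mp h2
      intro hx
      have := this x (by simp [PySem.Set.mem_ofList, hx])
      simp at this
    · rintro ⟨hx, hnd⟩
      rw [PySem.Set.ofList_eq_self_of_nodup xs hnd]
      simp only [PySem.Set.discard]
      rw [List.filter_eq_self.mpr]
      intro a ha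
      simp only [Bool.not_eq_eq_eq_not, Bool.not_true, beq_eq_false_iff_ne, ne_eq]
      rintro rfl; exact hx ha


lemma pv_adjacency_iff (G : List (Int × List Int)) (u v : Int) :
    adjacency G u v = true ↔ v ∈ pvNbr G u := by
  simp [adjacency, pvNbr]

lemma pvA_loop_iff (G1 G2 : List (Int × List Int)) (xs ys : List Int) (hlen : xs.length ≤ ys.length) :
    ((PySem.List.pyRange 0 (PySem.List.len xs) 1).all (fun i =>
      (PySem.List.pyRange 0 (PySem.List.len xs) 1).all (fun j =>
        (adjacency G1 (PySem.List.pyGetD xs i 0) (PySem.List.pyGetD xs j 0)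
           == adjacency G2 (PySem.List.pyGetD ys i 0) (PySem.List.pyGetD ys j 0))
        && ((PySem.List.pyGetD xs i 0 == PySem.List.pyGetD xs j 0)
           == (PySem.List.pyGetD ys i 0 == PySem.List.pyGetD ys j 0)))) = true)
    ↔ (pvCons (xs.zip ys) ∧ pvAdj G1 G2 (xs.zip ys)) := by
  have hzl : (xs.zip ys).length = xs.length := by
    rw [List.length_zip]; omega
  have step1 :
      ((PySem.List.pyRange 0 (PySem.List.len xs) 1).all (fun i =>
        (PySem.List.pyRange 0 (PySem.List.len xs) 1).all (fun j =>
          (adjacency G1 (PySem.List.pyGetD xs i 0) (PySem.List.pyGetD xs j 0)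
             == adjacency G2 (PySem.List.pyGetD ys i 0) (PySem.List.pyGetD ys j 0))
          && ((PySem.List.pyGetD xs i 0 == PySem.List.pyGetD xs j 0)
             == (PySem.List.pyGetD ys i 0 == PySem.List.pyGetD ys j 0)))) = true)
      ↔ (∀ k < xs.length, ∀ m < xs.length,
          (adjacency G1 (xs[k]?.getD 0) (xs[m]?.getD 0) = adjacency G2 (ys[k]?.getD 0) (ys[m]?.getD 0))
          ∧ ((xs[k]?.getD 0 = xs[m]?.getD 0) ↔ (ys[k]?.getD 0 = ys[m]?.getD 0))) := by
    simp only [List.all_eq_true, PySem.List.mem_pyRange_one, Bool.and_eq_true, beq_iff_eq, beq_eq_beq,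
      PySem.List.len_eq]
    constructor
    · intro h k hk m hm
      have := h (k : Int) ⟨Int.natCast_nonneg k, by exact_mod_cast hk⟩
                 (m : Int) ⟨Int.natCast_nonneg m, by exact_mod_cast hm⟩
      simpa using this
    · intro h i hi j hj
      have hik : i = ((i.toNat : Nat) : Int) := by omega
      have hjk : j = ((j.toNat : Nat) : Int) := by omega
      rw [hik, hjk]
      have := h i.toNat (by omega) j.toNat (by omega)
      simp only [PySem.List.pyGetD_natCast, List.getD_eq_getElem?_getD]
      exact this
  rw [step1]
  constructor
  · intro h
    have key : ∀ p ∈ xs.zip ys, ∀ q ∈ xs.zip ys,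
        ((q.1 ∈ pvNbr G1 p.1 ↔ q.2 ∈ pvNbr G2 p.2) ∧ (p.1 = q.1 ↔ p.2 = q.2)) := by
      intro p hp q hq
      obtain ⟨k, hk, rfl⟩ := List.mem_iff_getElem.mp hp
      obtain ⟨m, hm, rfl⟩ := List.mem_iff_getElem.mp hq
      have hk' : k < xs.length := by omega
      have hm' : m < xs.length := by omega
      have hc := h k hk' m hm'
      rw [List.getElem?_eq_getElem hk', List.getElem?_eq_getElem hm',
        List.getElem?_eq_getElem (show k < ys.length by omega),
        List.getElem?_eq_getElem (show m < ys.length by omega)] at hc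
      simp only [Option.getD_some] at hc
      simp only [List.getElem_zip]
      refine ⟨?_, hc.2⟩
      rw [← pv_adjacency_iff G1, ← pv_adjacency_iff G2]
      exact Bool.eq_iff_iff.mp hc.1
    exact ⟨fun p hp q hq => (key p hp q hq).2, fun p hp q hq => (key p hp q hq).1⟩
  · rintro ⟨hcons, hadj⟩ k hk m hm
    have hkz : k < (xs.zip ys).length := by omega
    have hmz : m < (xs.zip ys).length := by omega
    have hp : (xs.zip ys)[k] ∈ xs.zip ys := List.getElem_mem hkz
    have hq : (xs.zip ys)[m] ∈ xs.zip ys := List.getElem_mem hmz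
    have h1 := hadj _ hp _ hq
    have h2 := hcons _ hp _ hq
    simp only [List.getElem_zip] at h1 h2
    rw [List.getElem?_eq_getElem hk, List.getElem?_eq_getElem hm,
      List.getElem?_eq_getElem (show k < ys.length by omega),
      List.getElem?_eq_getElem (show m < ys.length by omega)]
    simp only [Option.getD_some]
    refine ⟨?_, h2⟩
    rw [Bool.eq_iff_iff, pv_adjacency_iff, pv_adjacency_iff]
    exact h1


-- B's cardinality checks decide pvCons
lemma pvB_card_iff (xs ys : List Int) :
    ((PySem.Set.ofList ((PySem.List.dedup (xs.zip ys)).map (fun p => p.1))).length = (PySem.List.dedup (xs.zip ys)).length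
      ∧ (PySem.Set.ofList ((PySem.List.dedup (xs.zip ys)).map (fun p => p.2))).length = (PySem.List.dedup (xs.zip ys)).length)
    ↔ pvCons (xs.zip ys) := by
  set L := xs.zip ys with hL
  set P := PySem.List.dedup L with hP
  have hmem : ∀ p : Int × Int, p ∈ P ↔ p ∈ L := fun p => PySem.List.mem_dedup L p
  have hnd : P.Nodup := PySem.List.nodup_dedup L
  have h1 : (PySem.Set.ofList (P.map (fun p => p.1))).length = P.length ↔ (P.map (fun p => p.1)).Nodup := by
    rw [show (PySem.Set.ofList (P.map (fun p => p.1)) : List Int) = PySem.List.dedup (P.map (fun p => p.1)) from by simp]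
    rw [← List.length_map (f := fun p : Int × Int => p.1) (as := P)]
    exact pv_dedup_length_eq_iff _
  have h2 : (PySem.Set.ofList (P.map (fun p => p.2))).length = P.length ↔ (P.map (fun p => p.2)).Nodup := by
    rw [show (PySem.Set.ofList (P.map (fun p => p.2)) : List Int) = PySem.List.dedup (P.map (fun p => p.2)) from by simp]
    rw [← List.length_map (f := fun p : Int × Int => p.2) (as := P)]
    exact pv_dedup_length_eq_iff _
  rw [h1, h2]
  constructor
  · rintro ⟨hf, hs⟩ p hp q hq
    constructor
    · intro h
      have := List.inj_on_of_nodup_map hf ((hmem p).mpr hp) ((hmem q).mpr hq) h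
      rw [this]
    · intro h
      have := List.inj_on_of_nodup_map hs ((hmem p).mpr hp) ((hmem q).mpr hq) h
      rw [this]
  · intro hc
    constructor
    · refine List.Nodup.map_on ?_ hnd
      intro p hp q hq h
      exact Prod.ext h (((hc p ((hmem p).mp hp) q ((hmem q).mp hq)).mp h))
    · refine List.Nodup.map_on ?_ hnd
      intro p hp q hq h
      exact Prod.ext (((hc p ((hmem p).mp hp) q ((hmem q).mp hq)).mpr h)) h


-- B's neighbour-image comparison decides pvAdj, given pvCons
lemma pvB_adj_iff (G1 G2 : List (Int × List Int)) (xs ys : List Int) (hc : pvCons (xs.zip ys)) :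
    ((PySem.List.dedup (xs.zip ys)).all (fun p =>
        PySem.Set.equal
          (PySem.Set.ofList (((PySem.List.dedup (xs.zip ys)).filter (fun q => ((PySem.Dict.mk G1).getD p.1 []).contains q.1)).map (fun q => q.2)))
          (PySem.Set.ofList (((PySem.List.dedup (xs.zip ys)).filter (fun q => ((PySem.Dict.mk G2).getD p.2 []).contains q.2)).map (fun q => q.2)))) = true)
    ↔ pvAdj G1 G2 (xs.zip ys) := by
  set L := xs.zip ys with hL
  set P := PySem.List.dedup L with hP
  have hmem : ∀ p : Int × Int, p ∈ P ↔ p ∈ L := fun p => PySem.List.mem_dedup L p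
  have hS : ∀ (p : Int × Int) (x : Int) (G : List (Int × List Int)) (c : (Int × Int) → Int),
      (x ∈ PySem.Set.ofList ((P.filter (fun q => ((PySem.Dict.mk G).getD (c p) []).contains (c q))).map (fun q => q.2)))
      ↔ ∃ q ∈ P, c q ∈ pvNbr G (c p) ∧ q.2 = x := by
    intro p x G c
    rw [PySem.Set.mem_ofList]
    simp [pvNbr, List.mem_filter]
  rw [List.all_eq_true]
  constructor
  · intro h p hpL q hqL
    have hp : p ∈ P := (hmem p).mpr hpL
    have hq : q ∈ P := (hmem q).mpr hqL
    have heq := (PySem.Set.equal_iff _ _).mp (h p hp)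
    constructor
    · intro hq1
      have hx : q.2 ∈ PySem.Set.ofList ((P.filter (fun r => ((PySem.Dict.mk G1).getD p.1 []).contains r.1)).map (fun r => r.2)) :=
        (hS p q.2 G1 (fun r => r.1)).mpr ⟨q, hq, hq1, rfl⟩
      obtain ⟨r, hr, hr2, hre⟩ := (hS p q.2 G2 (fun r => r.2)).mp ((heq q.2).mp hx)
      rwa [hre] at hr2
    · intro hq2
      have hx : q.2 ∈ PySem.Set.ofList ((P.filter (fun r => ((PySem.Dict.mk G2).getD p.2 []).contains r.2)).map (fun r => r.2)) :=
        (hS p q.2 G2 (fun r => r.2)).mpr ⟨q, hq, hq2, rfl⟩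
      obtain ⟨r, hr, hr1, hre⟩ := (hS p q.2 G1 (fun r => r.1)).mp ((heq q.2).mpr hx)
      have : r = q := by
        have h21 := (hc r ((hmem r).mp hr) q hqL).mpr hre
        exact Prod.ext h21 hre
      rwa [this] at hr1
  · intro ha p hp
    apply (PySem.Set.equal_iff _ _).mpr
    intro x
    rw [hS p x G1 (fun r => r.1), hS p x G2 (fun r => r.2)]
    constructor
    · rintro ⟨q, hq, hq1, rfl⟩
      exact ⟨q, hq, (ha p ((hmem p).mp hp) q ((hmem q).mp hq)).mp hq1, rfl⟩
    · rintro ⟨q, hq, hq2, rfl⟩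
      exact ⟨q, hq, (ha p ((hmem p).mp hp) q ((hmem q).mp hq)).mpr hq2, rfl⟩


-- ===== VERDICT (by name: the statement is the Claim_ definition above) =====
theorem partial_isomorphism_spec : Claim_equal_partial_isomorphism := by
  intro G1 G2 xs ys _ hpre
  unfold Spec_partial_isomorphism partial_isomorphism partial_isomorphism_alt
  by_cases hsz : (PySem.Set.ofList xs).len = (PySem.Set.ofList ys).len
  · have hsz' : (PySem.Set.ofList xs : List Int).length = (PySem.Set.ofList ys : List Int).length := by
      have := hsz
      simp only [PySem.Set.len, Nat.cast_inj] at this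
      exact this
    have hlen : xs.length ≤ ys.length := by
      rcases hpre with h | h
      · exact absurd (by simpa using hsz') h
      · exact h
    have hco : ((PySem.Set.ofList xs).len != (PySem.Set.ofList ys).len) = false := by simp [hsz']
    rw [hco]
    simp only [Bool.false_eq_true, if_false]
    by_cases hc : pvCons (xs.zip ys)
    · obtain ⟨hc1, hc2⟩ := (pvB_card_iff xs ys).mpr hc
      have hc1' := hc1; have hc2' := hc2
      simp only [PySem.List.dedup_eq_ofList] at hc1' hc2'
      have hcond : (((PySem.Set.ofList ((PySem.List.dedup (xs.zip ys)).map (fun p => p.1))).length != (PySem.List.dedup (xs.zip ys)).length)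
          || ((PySem.Set.ofList ((PySem.List.dedup (xs.zip ys)).map (fun p => p.2))).length != (PySem.List.dedup (xs.zip ys)).length)) = false := by
        simp [hc1', hc2']
      rw [hcond]
      simp only [Bool.false_eq_true, if_false]
      rw [Bool.eq_iff_iff, pvA_loop_iff G1 G2 xs ys hlen, pvB_adj_iff G1 G2 xs ys hc]
      exact ⟨fun h => h.2, fun h => ⟨hc, h⟩⟩
    · have hna : ¬ ((PySem.Set.ofList ((PySem.List.dedup (xs.zip ys)).map (fun p => p.1))).length = (PySem.List.dedup (xs.zip ys)).length
          ∧ (PySem.Set.ofList ((PySem.List.dedup (xs.zip ys)).map (fun p => p.2))).length = (PySem.List.dedup (xs.zip ys)).length) :=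
        fun h => hc ((pvB_card_iff xs ys).mp h)
      have hcond : (((PySem.Set.ofList ((PySem.List.dedup (xs.zip ys)).map (fun p => p.1))).length != (PySem.List.dedup (xs.zip ys)).length)
          || ((PySem.Set.ofList ((PySem.List.dedup (xs.zip ys)).map (fun p => p.2))).length != (PySem.List.dedup (xs.zip ys)).length)) = true := by
        rcases not_and_or.mp hna with h | h <;>
          · simp only [PySem.List.dedup_eq_ofList] at h
            simp [h]
      rw [hcond]
      simp only [if_true]
      apply eq_false_of_ne_true
      rw [pvA_loop_iff G1 G2 xs ys hlen]
      exact fun h => hc h.1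
  · have hco : ((PySem.Set.ofList xs).len != (PySem.Set.ofList ys).len) = true := by
      simp only [bne_iff_ne, ne_eq]
      intro h
      exact hsz h
    rw [hco]
    rfl
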